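-- pv_equiv track=rewrite | github.com/Dr0x3525/Proyecto-final-programacion | ejercicios_con_matrices/ejercicio2.py | comprobar_ser_consecutivos
-- ===== SOURCE A (Python) =====
-- def Comprobar_ser_primo(numero):
--     if numero <= 1:
--         return False
--     elif numero == 2:
--         return True
--     else:
--         for i in range(2,numero-1):
--             if numero % i  == 0:
--                 return False
--         return True
--
-- def comprobar_ser_consecutivos(a,b):
--
--     if a ==2 and b == 3:
--         return True
--     else:
--         for i in range(a+1,b-1):
--             if Comprobar_ser_primo(i):
--                 return False
--         return True
-- ===== SOURCE B (Python) =====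
-- def _es_primo(n):
--     if n < 2:
--         return False
--     if n < 4:
--         return True
--     if n % 2 == 0:
--         return False
--     d = 3
--     while d * d <= n:
--         if n % d == 0:
--             return False
--         d += 2
--     return True
--
-- def comprobar_ser_consecutivos(a, b):
--     return not any(_es_primo(i) for i in range(a + 1, b - 1))
-- ===== Notes on version B (the rewrite author's own statement) =====
-- stated objective: faster
-- what changed: replaces A's per-candidate trial division over all of 2..n-2 (plus a redundant special case) by a sqrt-bounded odd-step primality test inside a single lazy any() over the same interval; intended as faster (O(sqrt n) vs O(n) per candidate) and measured so on large intervals, though on intervals where both stop at the first nearby prime the two cost the same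
import Mathlib
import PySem

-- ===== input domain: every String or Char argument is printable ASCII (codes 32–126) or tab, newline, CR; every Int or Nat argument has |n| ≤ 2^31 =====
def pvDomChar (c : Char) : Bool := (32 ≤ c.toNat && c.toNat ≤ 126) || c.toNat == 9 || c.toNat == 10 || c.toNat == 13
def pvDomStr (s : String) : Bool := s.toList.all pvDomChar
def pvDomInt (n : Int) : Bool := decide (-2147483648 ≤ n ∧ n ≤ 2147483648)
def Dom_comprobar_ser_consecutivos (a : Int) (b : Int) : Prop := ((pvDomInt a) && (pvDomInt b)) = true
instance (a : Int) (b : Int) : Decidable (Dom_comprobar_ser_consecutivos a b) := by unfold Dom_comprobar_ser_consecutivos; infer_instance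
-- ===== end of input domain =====

-- B replaces A's per-candidate trial division up to n-2 by a sqrt-bounded odd-step
-- primality test over the same interval (intended as faster per candidate; measured so
-- in a timing run on large inputs); same results everywhere.

-- ===== PORT A =====
-- for i in range(2, numero-1): if numero % i == 0: return False; return True
def pyComprobarSerPrimo (numero : Int) : Bool :=
  if numero ≤ 1 then false
  else if numero == 2 then true
  else (PySem.List.pyRange 2 (numero - 1) 1).all (fun i => !(PySem.Int.mod numero i == 0))

-- for i in range(a+1, b-1): if Comprobar_ser_primo(i): return False; return True
def consLoopA (b : Int) (i : Int) : Bool :=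
  if i < b - 1 then
    if pyComprobarSerPrimo i then false else consLoopA b (i + 1)
  else true
termination_by (b - 1 - i).toNat
decreasing_by omega

def comprobar_ser_consecutivos (a : Int) (b : Int) : Bool :=
  if a == 2 && b == 3 then true
  else consLoopA b (a + 1)

-- ===== PORT B =====
-- while d * d <= n: if n % d == 0: return False; d += 2; return True
def esPrimoLoop (n : Int) (d : Int) : Bool :=
  if d * d ≤ n then
    if PySem.Int.mod n d == 0 then false
    else esPrimoLoop n (d + 2)
  else true
termination_by (n + 1 - d).toNat
decreasing_by
  have hd : d ≤ n := by nlinarith [mul_self_nonneg (2 * d - 1)]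
  omega

def esPrimo (n : Int) : Bool :=
  if n < 2 then false
  else if n < 4 then true
  else if PySem.Int.mod n 2 == 0 then false
  else esPrimoLoop n 3

-- any(_es_primo(i) for i in range(a+1, b-1)), lazily
def anyPrimoLoop (b : Int) (i : Int) : Bool :=
  if i < b - 1 then
    if esPrimo i then true else anyPrimoLoop b (i + 1)
  else false
termination_by (b - 1 - i).toNat
decreasing_by omega

def comprobar_ser_consecutivos_alt (a : Int) (b : Int) : Bool :=
  !(anyPrimoLoop b (a + 1))

-- ===== PRECONDITION & SPEC =====
def Spec_comprobar_ser_consecutivos (a : Int) (b : Int) (out : Bool) : Prop := out = comprobar_ser_consecutivos_alt a b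
instance (a : Int) (b : Int) (out : Bool) : Decidable (Spec_comprobar_ser_consecutivos a b out) := by unfold Spec_comprobar_ser_consecutivos; infer_instance

-- ===== CLAIM (what is proved, stated in full; the proofs are below) =====
def Claim_equal_comprobar_ser_consecutivos : Prop := ∀ (a : Int) (b : Int), Dom_comprobar_ser_consecutivos a b → Spec_comprobar_ser_consecutivos a b (comprobar_ser_consecutivos a b)

-- ===== LEMMAS AND PROOFS =====

-- "n has no divisor strictly between 1 and n"
def NoDiv (n : Int) : Prop := ∀ m : Int, 2 ≤ m → m < n → ¬ m ∣ n

theorem mod_eq_zero_iff_dvd' (a b : Int) (hb : 0 < b) :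
    (PySem.Int.mod a b == 0) = true ↔ b ∣ a := by
  rw [PySem.Int.mod_eq_emod_of_pos hb]
  simp only [beq_iff_eq]
  exact ⟨Int.dvd_of_emod_eq_zero, Int.emod_eq_zero_of_dvd⟩

theorem pyPrimo_iff (n : Int) (hn : 3 ≤ n) : pyComprobarSerPrimo n = true ↔ NoDiv n := by
  unfold pyComprobarSerPrimo
  rw [if_neg (by omega), if_neg (by simp; omega)]
  rw [List.all_eq_true]
  constructor
  · intro h m hm2 hmn hdvd
    by_cases hm : m = n - 1
    · have h1 : m ∣ (n - m) := (dvd_sub_right hdvd).mpr dvd_rfl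
      rw [hm] at h1
      have : n - (n - 1) = 1 := by ring
      rw [this] at h1
      have := Int.le_of_dvd (by norm_num) h1
      omega
    · have hx : m ∈ PySem.List.pyRange 2 (n - 1) 1 := by
        rw [PySem.List.mem_pyRange_one]; omega
      have := h m hx
      rw [← mod_eq_zero_iff_dvd' n m (by omega)] at hdvd
      simp [hdvd] at this
  · intro h x hx
    rw [PySem.List.mem_pyRange_one] at hx
    have hnd := h x (by omega) (by omega)
    rw [← mod_eq_zero_iff_dvd' n x (by omega)] at hnd
    simpa using hnd

theorem esPrimoLoop_iff (k : Nat) : ∀ n d : Int, (n + 1 - d).toNat ≤ k → 3 ≤ d → d % 2 = 1 →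
    (esPrimoLoop n d = true ↔ ∀ e : Int, d ≤ e → e % 2 = 1 → e * e ≤ n → ¬ e ∣ n) := by
  induction k with
  | zero =>
    intro n d hk hd hodd
    rw [esPrimoLoop]
    have hlt : ¬ d * d ≤ n := by
      intro h
      have hdn : d ≤ n := by nlinarith
      omega
    rw [if_neg hlt]
    refine iff_of_true rfl ?_
    intro e he hoe hee hdvd
    exact hlt (by nlinarith)
  | succ k ih =>
    intro n d hk hd hodd
    rw [esPrimoLoop]
    by_cases hle : d * d ≤ n
    · rw [if_pos hle]
      have hdn : d ≤ n := by nlinarith [mul_self_nonneg (2 * d - 1)]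
      by_cases hmod : (PySem.Int.mod n d == 0) = true
      · rw [if_pos hmod]
        refine iff_of_false (by simp) fun hP =>
          hP d le_rfl hodd hle ((mod_eq_zero_iff_dvd' n d (by omega)).mp hmod)
      · rw [if_neg hmod]
        rw [ih n (d + 2) (by omega) (by omega) (by omega)]
        constructor
        · intro h e he hoe hee hdvd
          by_cases hed : e = d
          · subst hed
            exact hmod ((mod_eq_zero_iff_dvd' n e (by omega)).mpr hdvd)
          · have : d + 2 ≤ e := by omega
            exact h e this hoe hee hdvd
        · intro h e he hoe hee
          exact h e (by omega) hoe hee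
    · rw [if_neg hle]
      refine iff_of_true rfl ?_
      intro e he hoe hee hdvd
      exact hle (by nlinarith)

theorem esPrimo_iff (n : Int) (hn : 3 ≤ n) : esPrimo n = true ↔ NoDiv n := by
  unfold esPrimo
  rw [if_neg (by omega)]
  by_cases h4 : n < 4
  · -- n = 3
    have h3 : n = 3 := by omega
    subst h3
    rw [if_pos (by norm_num : (3:Int) < 4)]
    refine iff_of_true rfl ?_
    intro m hm2 hm3 hdvd
    have := Int.le_of_dvd (by norm_num) hdvd
    interval_cases m
    · exact absurd hdvd (by decide)
  · rw [if_neg h4]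
    by_cases heven : (PySem.Int.mod n 2 == 0) = true
    · rw [if_pos heven]
      simp only [Bool.false_eq_true, false_iff]
      intro hnd
      exact hnd 2 (by omega) (by omega) ((mod_eq_zero_iff_dvd' n 2 (by norm_num)).mp heven)
    · rw [if_neg heven]
      have hodd : ¬ (2 : Int) ∣ n := fun h => heven ((mod_eq_zero_iff_dvd' n 2 (by norm_num)).mpr h)
      rw [esPrimoLoop_iff (n + 1 - 3).toNat n 3 (le_refl _) (by norm_num) (by norm_num)]
      constructor
      · intro h m hm2 hmn hdvd
        -- produce a divisor q with q*q ≤ n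
        obtain ⟨c, hc⟩ := hdvd
        have hmpos : 0 < m := by omega
        have hcpos : 0 < c := by nlinarith
        have hc2 : 2 ≤ c := by
          by_contra h'
          have hc1 : c = 1 := by omega
          subst hc1
          rw [mul_one] at hc
          omega
        have key : ∃ q : Int, 2 ≤ q ∧ q * q ≤ n ∧ q ∣ n := by
          rcases le_total m c with hmc | hcm
          · exact ⟨m, hm2, by nlinarith, ⟨c, hc⟩⟩
          · exact ⟨c, hc2, by nlinarith, ⟨m, by rw [hc]; ring⟩⟩
        obtain ⟨q, hq2, hqq, hqd⟩ := key
        have hqo : q % 2 = 1 := by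
          rcases Int.emod_two_eq q with h' | h'
          · exfalso
            exact hodd (dvd_trans (Int.dvd_of_emod_eq_zero h') hqd)
          · exact h'
        exact h q (by omega) hqo hqq hqd
      · intro h e he hoe hee hdvd
        have : e < n := by nlinarith
        exact h e (by omega) this hdvd

theorem primo_eq (n : Int) : pyComprobarSerPrimo n = esPrimo n := by
  by_cases h1 : n ≤ 1
  · unfold pyComprobarSerPrimo esPrimo
    rw [if_pos h1, if_pos (by omega)]
  · by_cases h2 : n = 2
    · subst h2; decide
    · have hn : 3 ≤ n := by omega
      rw [Bool.eq_iff_iff, pyPrimo_iff n hn, esPrimo_iff n hn]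

theorem loops_eq (k : Nat) : ∀ b i : Int, (b - 1 - i).toNat ≤ k →
    consLoopA b i = !(anyPrimoLoop b i) := by
  induction k with
  | zero =>
    intro b i hk
    rw [consLoopA, anyPrimoLoop, if_neg (by omega), if_neg (by omega)]
    rfl
  | succ k ih =>
    intro b i hk
    rw [consLoopA, anyPrimoLoop]
    by_cases hlt : i < b - 1
    · rw [if_pos hlt, if_pos hlt, primo_eq]
      by_cases hp : esPrimo i = true
      · rw [if_pos hp, if_pos hp]; rfl
      · rw [if_neg hp, if_neg hp]
        exact ih b (i + 1) (by omega)
    · rw [if_neg hlt, if_neg hlt]; rfl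

-- ===== VERDICT (by name: the statement is the Claim_ definition above) =====
theorem comprobar_ser_consecutivos_spec : Claim_equal_comprobar_ser_consecutivos := by
  intro a b _
  unfold Spec_comprobar_ser_consecutivos comprobar_ser_consecutivos comprobar_ser_consecutivos_alt
  have hloop := loops_eq (b - 1 - (a + 1)).toNat b (a + 1) le_rfl
  by_cases hsp : (a == 2 && b == 3) = true
  · rw [if_pos hsp]
    simp only [Bool.and_eq_true, beq_iff_eq] at hsp
    obtain ⟨ha, hb⟩ := hsp; subst ha; subst hb
    rw [anyPrimoLoop, if_neg (by norm_num)]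
    rfl
  · rw [if_neg hsp]
    exact hloop
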